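-- pv_equiv track=rewrite | github.com/theB3an/snoo.py | snoopy/lib/functions/get_PasswordPolicy.py | parse_pwdProperties
-- ===== SOURCE A (Python) =====
-- def parse_pwdProperties(pwdProperties):
--     parser = []
--     while pwdProperties:
--         parser.append(pwdProperties % 2)
--         pwdProperties //= 2
--
--     parser = parser[::-1]
--     if len(parser) != 8:
--         for x in range(6-len(parser)):
--             parser.insert(0, 0)
--     values = "".join([str(v) for v in parser])
--     if int(values[5]) == 1:
--         return True
--     else:
--         return False
-- ===== SOURCE B (Python) =====
-- def parse_pwdProperties(pwdProperties):
--     # Render the flags as a zero-padded 6-bit binary string and test its 6th character.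
--     return format(pwdProperties, '06b')[5] == '1'
-- ===== Notes on version B (the rewrite author's own statement) =====
-- stated objective: idiomatic
-- what changed: Replaces the manual digit-decomposition loop, list reversal, front-padding loop and str-join with a single format(n,'06b') call and a direct character test; Pre_ excludes negative inputs, on which A's halving while-loop never terminates.
import Mathlib
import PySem

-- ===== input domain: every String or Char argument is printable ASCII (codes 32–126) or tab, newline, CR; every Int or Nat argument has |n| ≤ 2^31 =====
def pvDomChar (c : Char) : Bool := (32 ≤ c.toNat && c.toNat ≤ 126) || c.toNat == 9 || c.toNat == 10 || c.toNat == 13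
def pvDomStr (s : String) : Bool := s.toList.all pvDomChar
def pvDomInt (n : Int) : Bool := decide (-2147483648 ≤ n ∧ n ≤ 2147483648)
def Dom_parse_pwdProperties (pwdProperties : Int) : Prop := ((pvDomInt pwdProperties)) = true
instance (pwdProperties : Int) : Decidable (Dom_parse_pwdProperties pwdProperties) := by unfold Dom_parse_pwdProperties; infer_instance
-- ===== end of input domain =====

-- B replaces A's digit-list build / reverse / front-pad / str-join with one format(n,'06b') rendering and a direct character test; objective: idiomatic.


-- ===== PORT A =====
-- 'while pwdProperties:' — guarded with positivity for totality; Python diverges on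
-- negative input (floor division never reaches zero), excluded by Pre_ below.
def pwLoop (p : Int) (acc : List Int) : List Int :=
  if _h : 0 < p then
    pwLoop (PySem.Int.floordiv p 2) (acc ++ [PySem.Int.mod p 2])
  else acc
termination_by p.toNat
decreasing_by
  rw [PySem.Int.floordiv_eq_ediv_of_pos (by omega)]
  omega

def parse_pwdProperties (pwdProperties : Int) : Bool :=
  let parser := pwLoop pwdProperties []
  let parser := (PySem.List.slice? parser none none (-1)).getD []   -- parser[::-1]
  let parser :=
    if parser.length ≠ 8 then
      (PySem.List.pyRange 0 (6 - (parser.length : Int)) 1).foldl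
        (fun ps _ => PySem.List.insert ps 0 (0 : Int)) parser
    else parser
  let values := PySem.Str.join "" (parser.map PySem.Int.toStr)
  match PySem.Str.pyGet? values 5 with
  | some c =>
    match PySem.Int.ofStr? (String.ofList [c]) with   -- int(values[5]); digit char, never ValueError
    | some v => v == 1
    | none => false
  | none => false   -- IndexError: unreachable, values has ≥ 6 chars

-- ===== PORT B =====
-- Hand port of format(n, 'b') (binary rendering, MSB first); exact for 0 ≤ n.
def binChars (m : Nat) : List Char :=
  if m < 2 then [if m = 1 then '1' else '0']
  else binChars (m / 2) ++ [if m % 2 = 1 then '1' else '0']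

def parse_pwdProperties_alt (pwdProperties : Int) : Bool :=
  -- format(pwdProperties, '06b'): binary digits, zero-padded on the left to width 6
  let s := binChars pwdProperties.toNat
  let s := List.replicate (6 - s.length) '0' ++ s
  s[5]? == some '1'

-- ===== PRECONDITION & SPEC =====
-- Pre_ excludes negative inputs: there A's halving while-loop never terminates,
-- so A returns exactly on the nonnegative inputs.
def Pre_parse_pwdProperties (pwdProperties : Int) : Prop := 0 ≤ pwdProperties
instance (pwdProperties : Int) : Decidable (Pre_parse_pwdProperties pwdProperties) := by
  unfold Pre_parse_pwdProperties; infer_instance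
def pvWitness_parse_pwdProperties : Int := (97)

def Spec_parse_pwdProperties (pwdProperties : Int) (out : Bool) : Prop := out = parse_pwdProperties_alt pwdProperties
instance (pwdProperties : Int) (out : Bool) : Decidable (Spec_parse_pwdProperties pwdProperties out) := by unfold Spec_parse_pwdProperties; infer_instance

-- ===== CLAIM (what is proved, stated in full; the proofs are below) =====
def Claim_equal_parse_pwdProperties : Prop := ∀ (pwdProperties : Int), Dom_parse_pwdProperties pwdProperties → Pre_parse_pwdProperties pwdProperties → Spec_parse_pwdProperties pwdProperties (parse_pwdProperties pwdProperties)

-- ===== LEMMAS AND PROOFS =====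

-- LSB-first binary digits of a natural number (proof-side model of A's while loop)
def bitsN (m : Nat) : List Int :=
  if h : 0 < m then ((m % 2 : Nat) : Int) :: bitsN (m / 2) else []
termination_by m
decreasing_by omega

theorem pwLoop_eq (m : Nat) : ∀ acc, pwLoop (m : Int) acc = acc ++ bitsN m := by
  induction m using Nat.strong_induction_on with
  | _ m ih =>
    intro acc
    rw [pwLoop, bitsN]
    by_cases h : 0 < m
    · have h1 : (0 : Int) < (m : Int) := by exact_mod_cast h
      have hf : PySem.Int.floordiv (m : Int) 2 = ((m / 2 : Nat) : Int) := by
        exact_mod_cast PySem.Int.floordiv_natCast m 2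
      have hm : PySem.Int.mod (m : Int) 2 = ((m % 2 : Nat) : Int) := by
        exact_mod_cast PySem.Int.mod_natCast m 2
      simp only [h1, dif_pos, h, hf, hm]
      rw [ih (m / 2) (by omega)]
      simp
    · have h0 : m = 0 := by omega
      subst h0
      simp

theorem getElem?_bitsN (m i : Nat) (h : i < (bitsN m).length) :
    (bitsN m)[i]? = some ((m / 2 ^ i % 2 : Nat) : Int) := by
  induction m using Nat.strong_induction_on generalizing i with
  | _ m ih =>
    rw [bitsN.eq_def] at h
    rw [bitsN.eq_def]
    by_cases hm : 0 < m
    · simp only [hm, dif_pos] at h ⊢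
      cases i with
      | zero => simp
      | succ j =>
        simp only [List.getElem?_cons_succ]
        rw [ih (m / 2) (by omega) j (by simpa using h)]
        congr 2
        rw [Nat.div_div_eq_div_mul]
        ring_nf
    · simp [hm] at h

theorem foldl_insert_zero (l : List Int) : ∀ init : List Int,
    l.foldl (fun ps _ => PySem.List.insert ps 0 (0 : Int)) init
      = List.replicate l.length 0 ++ init := by
  induction l with
  | nil => simp
  | cons a t ih =>
    intro init
    rw [List.foldl_cons, PySem.List.insert_zero, ih]
    simp [List.replicate_succ']

theorem bitsN_mem (m : Nat) : ∀ v ∈ bitsN m, v = 0 ∨ v = 1 := by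
  induction m using Nat.strong_induction_on with
  | _ m ih =>
    rw [bitsN.eq_def]
    by_cases hm : 0 < m
    · simp only [hm, dif_pos, List.mem_cons]
      rintro v (rfl | hv)
      · have : m % 2 = 0 ∨ m % 2 = 1 := by omega
        rcases this with h | h <;> simp [h]
      · exact ih (m / 2) (by omega) v hv
    · simp [hm]

theorem flatten_chars (l : List Int) (h : ∀ v ∈ l, v = 0 ∨ v = 1) :
    (l.map PySem.Int.toChars).flatten = l.map (fun v => if v = 1 then '1' else '0') := by
  induction l with
  | nil => simp
  | cons a t ih =>
    have h0 : PySem.Int.toChars 0 = ['0'] := by decide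
    have h1 : PySem.Int.toChars 1 = ['1'] := by decide
    rcases h a (by simp) with rfl | rfl <;>
      simp [ih (fun v hv => h v (by simp [hv])), h0, h1]

-- binChars is the MSB-first rendering of bitsN
theorem binChars_eq (m : Nat) (hm : 0 < m) :
    binChars m = ((bitsN m).map (fun v => if v = 1 then '1' else '0')).reverse := by
  induction m using Nat.strong_induction_on with
  | _ m ih =>
    rw [binChars, bitsN]
    by_cases h2 : m < 2
    · have : m = 1 := by omega
      subst this
      simp [bitsN]
    · have hpos : 0 < m := by omega
      simp only [h2, if_false, hpos, dif_pos]
      rw [ih (m / 2) (by omega) (by omega)]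
      by_cases hmod : m % 2 = 1
      · simp [hmod]
      · have h0 : m % 2 = 0 := by omega
        simp [h0]

-- the element A and B both read: index 5 of the front-padded MSB-first digit list
theorem padded_get5 (m : Nat) (hm : 0 < m) :
    (List.replicate (6 - (bitsN m).length) (0 : Int) ++ (bitsN m).reverse)[5]?
      = some ((m / 2 ^ ((bitsN m).length - 6) % 2 : Nat) : Int) := by
  set L := (bitsN m).length with hLdef
  have hL1 : 0 < L := by rw [hLdef, bitsN]; simp [hm]
  have hlen2 : 5 < (List.replicate (6 - L) (0 : Int) ++ (bitsN m).reverse).length := by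
    simp only [List.length_append, List.length_replicate, List.length_reverse, ← hLdef]
    omega
  rw [List.getElem?_eq_getElem hlen2]
  by_cases h6 : L ≤ 6
  · have e0 : L - 6 = 0 := by omega
    rw [List.getElem_append_right (by simp only [List.length_replicate]; omega)]
    rw [List.getElem_reverse]
    have hi : (bitsN m).length - 1 - (5 - (List.replicate (6 - L) (0 : Int)).length) = 0 := by
      simp only [List.length_replicate, ← hLdef]
      omega
    simp only [hi]
    have hb := getElem?_bitsN m 0 (by omega)
    rw [← List.getElem?_eq_getElem (by omega), hb, e0]
  · have e0 : 6 - L = 0 := by omega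
    have hi : ∀ hh : 5 < (List.replicate (6 - L) (0 : Int) ++ (bitsN m).reverse).length,
        (List.replicate (6 - L) (0 : Int) ++ (bitsN m).reverse)[5]'hh
          = (bitsN m).reverse[5]'(by simpa [e0] using hh) := by
      intro hh
      congr 1 ; simp [e0]
    rw [hi hlen2, List.getElem_reverse]
    have h1L : (bitsN m).length - 1 - 5 = L - 6 := by omega
    simp only [h1L]
    have hb := getElem?_bitsN m (L - 6) (by omega)
    rw [← List.getElem?_eq_getElem (by omega), hb]

theorem parseA_val (m : Nat) :
    parse_pwdProperties (m : Int)
      = decide (m / 2 ^ ((bitsN m).length - 6) % 2 = 1) := by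
  by_cases hm : 0 < m
  · simp only [parse_pwdProperties]
    rw [pwLoop_eq m [], List.nil_append, PySem.List.slice?_none_none_neg_one,
      Option.getD_some]
    have hL1 : 0 < (bitsN m).length := by
      rw [bitsN.eq_def]; simp [hm]
    have hfin :
        (if (bitsN m).reverse.length ≠ 8 then
          (PySem.List.pyRange 0 (6 - ((bitsN m).reverse.length : Int)) 1).foldl
            (fun ps _ => PySem.List.insert ps 0 (0 : Int)) (bitsN m).reverse
        else (bitsN m).reverse)
        = List.replicate (6 - (bitsN m).length) 0 ++ (bitsN m).reverse := by
      by_cases h8 : (bitsN m).length = 8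
      · simp [h8]
      · rw [if_pos (by simpa using h8), foldl_insert_zero]
        congr 1
        congr 1
        rw [PySem.List.length_pyRange_one]
        simp
    rw [hfin]
    set L := (bitsN m).length with hLdef
    set l : List Int := List.replicate (6 - L) 0 ++ (bitsN m).reverse with hl
    have hmem : ∀ v ∈ l, v = 0 ∨ v = 1 := by
      intro v hv
      rcases List.mem_append.mp hv with h | h
      · exact Or.inl (List.eq_of_mem_replicate h)
      · exact bitsN_mem m v (List.mem_reverse.mp h)
    have hjoin : (PySem.Str.join "" (l.map PySem.Int.toStr)).toList
        = l.map (fun v => if v = 1 then '1' else '0') := by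
      rw [PySem.Str.toList_join]
      have hmm : List.map String.toList (l.map PySem.Int.toStr) = l.map PySem.Int.toChars := by
        simp [List.map_map, Function.comp_def, PySem.Int.toList_toStr]
      rw [hmm]
      have hic : PySem.Chars.join "".toList (l.map PySem.Int.toChars)
          = (l.map PySem.Int.toChars).flatten := by
        show List.intercalate [] _ = _
        generalize (l.map PySem.Int.toChars) = xss
        simp [List.intercalate]
        induction xss with
        | nil => simp
        | cons a t ih => cases t <;> simp_all [List.intersperse]
      rw [hic, flatten_chars l hmem]
    have hlen : 5 < l.length := by
      rw [hl]
      simp only [List.length_append, List.length_replicate, List.length_reverse]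
      omega
    show (match PySem.Str.pyGet? (PySem.Str.join "" (List.map PySem.Int.toStr l)) 5 with
      | some c =>
        match PySem.Int.ofStr? (String.ofList [c]) with
        | some v => v == 1
        | none => false
      | none => false) = _
    rw [show PySem.Str.pyGet? (PySem.Str.join "" (List.map PySem.Int.toStr l)) 5
        = PySem.List.pyGet? (l.map (fun v => if v = 1 then '1' else '0')) 5 by
      simp [PySem.Str.pyGet?, PySem.Chars.pyGet?, hjoin]]
    rw [show (5 : Int) = ((5 : Nat) : Int) from rfl, PySem.List.pyGet?_natCast]
    rw [List.getElem?_map]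
    rw [hl, padded_get5 m hm, ← hLdef]
    rcases Nat.mod_two_eq_zero_or_one (m / 2 ^ (L - 6)) with h | h <;> rw [h]
    · simp only [Nat.cast_zero]
      norm_num
      decide
    · simp only [Nat.cast_one]
      norm_num
      decide
  · have h0 : m = 0 := by omega
    subst h0
    have hL : pwLoop ((0 : Nat) : Int) [] = [] := by rw [pwLoop]; norm_num
    have hb : bitsN 0 = [] := by rw [bitsN]; simp
    simp only [parse_pwdProperties, hL, hb]
    decide

theorem altB_val (m : Nat) :
    parse_pwdProperties_alt (m : Int)
      = decide (m / 2 ^ ((bitsN m).length - 6) % 2 = 1) := by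
  by_cases hm : 0 < m
  · simp only [parse_pwdProperties_alt, Int.toNat_natCast]
    rw [binChars_eq m hm]
    set f : Int → Char := fun v => if v = 1 then '1' else '0' with hf
    have hrev : ((bitsN m).map f).reverse = (bitsN m).reverse.map f := by
      rw [List.map_reverse]
    have hrep : List.replicate (6 - ((bitsN m).map f).reverse.length) '0'
        = (List.replicate (6 - (bitsN m).length) (0 : Int)).map f := by
      simp [hf]
    rw [hrep, hrev, ← List.map_append, List.getElem?_map, padded_get5 m hm]
    rcases Nat.mod_two_eq_zero_or_one (m / 2 ^ ((bitsN m).length - 6)) with h | h <;> rw [h]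
    · simp only [Nat.cast_zero]
      norm_num
      simp [hf]
    · simp only [Nat.cast_one]
      norm_num
      simp [hf]
  · have h0 : m = 0 := by omega
    subst h0
    have hb : bitsN 0 = [] := by rw [bitsN]; simp
    have hb0 : binChars 0 = ['0'] := by rw [binChars]; norm_num
    simp only [parse_pwdProperties_alt, Int.toNat_natCast, hb, hb0]
    decide

-- ===== VERDICT (by name: the statement is the Claim_ definition above) =====
theorem parse_pwdProperties_spec : Claim_equal_parse_pwdProperties := by
  intro p _ hpre
  unfold Pre_parse_pwdProperties at hpre
  unfold Spec_parse_pwdProperties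
  obtain ⟨m, rfl⟩ : ∃ m : Nat, p = (m : Int) := ⟨p.toNat, by omega⟩
  rw [parseA_val, altB_val]
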